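-- pv_equiv track=rewrite | github.com/Caio893/projeto_A3_Rogerio02 | dist-win-portable/05 - advanced_world.py | _clock_text_width_px
-- ===== SOURCE A (Python) =====
-- CLOCK_FONT = {
--     "0": ["111", "101", "101", "101", "111"],
--     "1": ["010", "110", "010", "010", "111"],
--     "2": ["111", "001", "111", "100", "111"],
--     "3": ["111", "001", "111", "001", "111"],
--     "4": ["101", "101", "111", "001", "001"],
--     "5": ["111", "100", "111", "001", "111"],
--     "6": ["111", "100", "111", "101", "111"],
--     "7": ["111", "001", "010", "010", "010"],
--     "8": ["111", "101", "111", "101", "111"],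
--     "9": ["111", "101", "111", "001", "111"],
--     ":": ["000", "010", "000", "010", "000"],
-- }
--
-- CLOCK_CELL_PX = 8
--
-- def _clock_text_width_px(text: str, cell_px: int = CLOCK_CELL_PX, gap_px: int = 2) -> int:
--     width = 0
--     first = True
--     for ch in text:
--         pattern = CLOCK_FONT.get(ch)
--         if not pattern:
--             continue
--         if not first:
--             width += gap_px
--         width += len(pattern[0]) * cell_px
--         first = False
--     return width
-- ===== SOURCE B (Python) =====
-- CLOCK_FONT = {
--     "0": ["111", "101", "101", "101", "111"],
--     "1": ["010", "110", "010", "010", "111"],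
--     "2": ["111", "001", "111", "100", "111"],
--     "3": ["111", "001", "111", "001", "111"],
--     "4": ["101", "101", "111", "001", "001"],
--     "5": ["111", "100", "111", "001", "111"],
--     "6": ["111", "100", "111", "101", "111"],
--     "7": ["111", "001", "010", "010", "010"],
--     "8": ["111", "101", "111", "101", "111"],
--     "9": ["111", "101", "111", "001", "111"],
--     ":": ["000", "010", "000", "010", "000"],
-- }
--
-- CLOCK_CELL_PX = 8
--
-- def _clock_text_width_px(text: str, cell_px: int = CLOCK_CELL_PX, gap_px: int = 2) -> int:
--     # Every glyph in CLOCK_FONT is exactly 3 columns wide, so the width depends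
--     # only on how many recognised characters the text contains.
--     n = sum(1 for ch in text if ch in CLOCK_FONT)
--     if n == 0:
--         return 0
--     return n * (3 * cell_px) + (n - 1) * gap_px
-- ===== Notes on version B (the rewrite author's own statement) =====
-- stated objective: simpler
-- what changed: Drops the pattern lookup and the 'first' sentinel loop entirely: since every CLOCK_FONT glyph is exactly 3 columns wide, B just counts recognised characters and returns the closed form n*(3*cell_px) + (n-1)*gap_px (0 when n == 0).
import Mathlib
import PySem

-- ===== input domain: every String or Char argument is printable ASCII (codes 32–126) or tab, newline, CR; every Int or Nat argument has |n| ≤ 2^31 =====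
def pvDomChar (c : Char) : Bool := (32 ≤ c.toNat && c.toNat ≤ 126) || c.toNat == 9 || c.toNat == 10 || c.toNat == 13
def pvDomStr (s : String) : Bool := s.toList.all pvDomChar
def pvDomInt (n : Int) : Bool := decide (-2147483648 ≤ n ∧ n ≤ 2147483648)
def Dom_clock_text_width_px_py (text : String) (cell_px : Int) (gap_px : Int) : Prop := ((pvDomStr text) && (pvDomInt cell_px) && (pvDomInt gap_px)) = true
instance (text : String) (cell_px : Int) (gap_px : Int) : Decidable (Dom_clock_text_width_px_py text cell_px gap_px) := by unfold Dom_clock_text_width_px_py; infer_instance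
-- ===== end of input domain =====

-- B drops the pattern lookup and the 'first' sentinel loop: every CLOCK_FONT glyph is
-- exactly 3 columns wide, so B counts recognised characters and uses a closed form; simpler.

-- ===== PORT A =====
-- CLOCK_FONT.get ch (A's helper: the module-level constant dict)
def clockFont (ch : Char) : Option (List String) :=
  if ch = '0' then some ["111", "101", "101", "101", "111"]
  else if ch = '1' then some ["010", "110", "010", "010", "111"]
  else if ch = '2' then some ["111", "001", "111", "100", "111"]
  else if ch = '3' then some ["111", "001", "111", "001", "111"]
  else if ch = '4' then some ["101", "101", "111", "001", "001"]
  else if ch = '5' then some ["111", "100", "111", "001", "111"]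
  else if ch = '6' then some ["111", "100", "111", "101", "111"]
  else if ch = '7' then some ["111", "001", "010", "010", "010"]
  else if ch = '8' then some ["111", "101", "111", "101", "111"]
  else if ch = '9' then some ["111", "101", "111", "001", "111"]
  else if ch = ':' then some ["000", "010", "000", "010", "000"]
  else none

def clock_text_width_px_py (text : String) (cell_px : Int) (gap_px : Int) : Int :=
  (text.toList.foldl (fun (s : Int × Bool) ch =>
      match clockFont ch with
      | none => s                      -- not pattern (None): continue
      | some [] => s                   -- not pattern (empty list): continue
      | some (r :: _) =>               -- pattern[0] = r
        ((if s.2 then s.1 else s.1 + gap_px) + PySem.Str.len r * cell_px, false))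
    ((0 : Int), true)).1

-- ===== PORT B =====
-- `ch in CLOCK_FONT`: membership in the key set
def clockKeys : List Char := ['0', '1', '2', '3', '4', '5', '6', '7', '8', '9', ':']

def clock_text_width_px_py_alt (text : String) (cell_px : Int) (gap_px : Int) : Int :=
  let n : Int := text.toList.countP (fun ch => clockKeys.contains ch)
  if n = 0 then 0
  else n * (3 * cell_px) + (n - 1) * gap_px

-- ===== PRECONDITION & SPEC =====
def Spec_clock_text_width_px_py (text : String) (cell_px : Int) (gap_px : Int) (out : Int) : Prop := out = clock_text_width_px_py_alt text cell_px gap_px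
instance (text : String) (cell_px : Int) (gap_px : Int) (out : Int) : Decidable (Spec_clock_text_width_px_py text cell_px gap_px out) := by unfold Spec_clock_text_width_px_py; infer_instance

-- ===== CLAIM (what is proved, stated in full; the proofs are below) =====
def Claim_equal_clock_text_width_px_py : Prop := ∀ (text : String) (cell_px : Int) (gap_px : Int), Dom_clock_text_width_px_py text cell_px gap_px → Spec_clock_text_width_px_py text cell_px gap_px (clock_text_width_px_py text cell_px gap_px)

-- ===== LEMMAS AND PROOFS =====

-- per-character case analysis: either ch is not a key (font lookup is none), or it is a
-- key and its pattern's first row has length 3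
theorem pvCharCases (ch : Char) :
    (clockFont ch = none ∧ clockKeys.contains ch = false) ∨
    (∃ r rs, clockFont ch = some (r :: rs) ∧ PySem.Str.len r = 3 ∧ clockKeys.contains ch = true) := by
  by_cases hk : ch ∈ clockKeys
  · fin_cases hk
    · exact Or.inr ⟨"111", ["101", "101", "101", "111"], by decide, by decide, by decide⟩
    · exact Or.inr ⟨"010", ["110", "010", "010", "111"], by decide, by decide, by decide⟩
    · exact Or.inr ⟨"111", ["001", "111", "100", "111"], by decide, by decide, by decide⟩
    · exact Or.inr ⟨"111", ["001", "111", "001", "111"], by decide, by decide, by decide⟩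
    · exact Or.inr ⟨"101", ["101", "111", "001", "001"], by decide, by decide, by decide⟩
    · exact Or.inr ⟨"111", ["100", "111", "001", "111"], by decide, by decide, by decide⟩
    · exact Or.inr ⟨"111", ["100", "111", "101", "111"], by decide, by decide, by decide⟩
    · exact Or.inr ⟨"111", ["001", "010", "010", "010"], by decide, by decide, by decide⟩
    · exact Or.inr ⟨"111", ["101", "111", "101", "111"], by decide, by decide, by decide⟩
    · exact Or.inr ⟨"111", ["101", "111", "001", "111"], by decide, by decide, by decide⟩
    · exact Or.inr ⟨"000", ["010", "000", "010", "000"], by decide, by decide, by decide⟩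
  · refine Or.inl ⟨?_, by simpa using hk⟩
    simp only [clockKeys, List.mem_cons, List.not_mem_nil, or_false] at hk
    push Not at hk
    obtain ⟨h0, h1, h2, h3, h4, h5, h6, h7, h8, h9, h10⟩ := hk
    simp [clockFont, h0, h1, h2, h3, h4, h5, h6, h7, h8, h9, h10]

-- A's loop from a non-first state adds gap_px + 3*cell_px per recognised character
theorem pvLoopA_false (cell_px gap_px : Int) (l : List Char) : ∀ (w : Int),
    l.foldl (fun (s : Int × Bool) ch =>
      match clockFont ch with
      | none => s
      | some [] => s
      | some (r :: _) =>
        ((if s.2 then s.1 else s.1 + gap_px) + PySem.Str.len r * cell_px, false))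
      (w, false)
    = (w + (l.countP (fun ch => clockKeys.contains ch) : Int) * (gap_px + 3 * cell_px), false) := by
  induction l with
  | nil => simp
  | cons ch t ih =>
    intro w
    simp only [List.foldl_cons, List.countP_cons]
    rcases pvCharCases ch with ⟨hf, hk⟩ | ⟨r, rs, hf, hr, hk⟩
    · rw [hf]
      simp only [hk]
      rw [ih]
      simp
    · rw [hf]
      simp only [hk]
      rw [ih, hr]
      simp only [Prod.mk.injEq, and_true]
      push_cast
      ring

-- A's loop from the initial (first) state computes B's closed form
theorem pvLoopA_true (cell_px gap_px : Int) (l : List Char) :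
    (l.foldl (fun (s : Int × Bool) ch =>
      match clockFont ch with
      | none => s
      | some [] => s
      | some (r :: _) =>
        ((if s.2 then s.1 else s.1 + gap_px) + PySem.Str.len r * cell_px, false))
      ((0 : Int), true)).1
    = (if (l.countP (fun ch => clockKeys.contains ch) : Int) = 0 then 0
       else (l.countP (fun ch => clockKeys.contains ch) : Int) * (3 * cell_px)
            + ((l.countP (fun ch => clockKeys.contains ch) : Int) - 1) * gap_px) := by
  induction l with
  | nil => simp
  | cons ch t ih =>
    simp only [List.foldl_cons, List.countP_cons]
    rcases pvCharCases ch with ⟨hf, hk⟩ | ⟨r, rs, hf, hr, hk⟩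
    · rw [hf]
      simp only [hk]
      simpa using ih
    · rw [hf]
      simp only [hk]
      rw [pvLoopA_false cell_px gap_px t, hr]
      simp only [if_true]
      rw [if_neg (show ¬((List.countP (fun ch => clockKeys.contains ch) t + 1 : ℕ) : ℤ) = 0 by omega)]
      push_cast
      ring

-- ===== VERDICT (by name: the statement is the Claim_ definition above) =====
theorem clock_text_width_px_py_spec : Claim_equal_clock_text_width_px_py := by
  intro text cell_px gap_px _
  unfold Spec_clock_text_width_px_py clock_text_width_px_py clock_text_width_px_py_alt
  simpa using pvLoopA_true cell_px gap_px text.toList
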